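-- pv_equiv track=rewrite | github.com/vaidyaritesh88/Vahan-app | scraper/vahan_scraper.py | _parse_month
-- ===== SOURCE A (Python) =====
-- MONTH_MAP = {
--     1: "January", 2: "February", 3: "March", 4: "April",
--     5: "May", 6: "June", 7: "July", 8: "August",
--     9: "September", 10: "October", 11: "November", 12: "December",
-- }
--
-- def _parse_month(label):
--     """Parse a month label to a month number."""
--     if not label:
--         return None
--     label = label.strip()
--
--     # Try full month name
--     for num, name in MONTH_MAP.items():
--         if label.lower() == name.lower() or label.lower() == name[:3].lower():
--             return num
--
--     # Try numeric
--     try: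
--         num = int(label)
--         if 1 <= num <= 12:
--             return num
--     except ValueError:
--         pass
--
--     return None
-- ===== SOURCE B (Python) =====
-- _PACKED = "janfebmaraprmayjunjulaugsepoctnovdec"
-- _FULL = ["january", "february", "march", "april", "may", "june", "july",
--          "august", "september", "october", "november", "december"]
--
--
-- def _parse_month(label):
--     """Parse a month label to a month number."""
--     if not label:
--         return None
--     t = label.strip()
--     u = t.lower()
--     # index the first three letters into the packed abbreviation string,
--     # then verify the candidate month against the abbreviation or full name
--     i = _PACKED.find(u[:3])
--     if i >= 0 and i % 3 == 0 and (u == _PACKED[i:i + 3] or u == _FULL[i // 3]):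
--         return i // 3 + 1
--     try:
--         num = int(t)
--     except ValueError:
--         return None
--     return num if 1 <= num <= 12 else None
-- ===== Notes on version B (the rewrite author's own statement) =====
-- stated objective: alternative
-- what changed: Instead of scanning the 12 (number, name) pairs with two lowered comparisons each, B indexes the first three lowered characters into a single packed 36-character abbreviation constant via str.find, derives the candidate month arithmetically from the aligned offset (i//3+1), and verifies it against the abbreviation slice or the full name; the numeric fallback is restructured as a single try around int with the range check outside.
import Mathlib
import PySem

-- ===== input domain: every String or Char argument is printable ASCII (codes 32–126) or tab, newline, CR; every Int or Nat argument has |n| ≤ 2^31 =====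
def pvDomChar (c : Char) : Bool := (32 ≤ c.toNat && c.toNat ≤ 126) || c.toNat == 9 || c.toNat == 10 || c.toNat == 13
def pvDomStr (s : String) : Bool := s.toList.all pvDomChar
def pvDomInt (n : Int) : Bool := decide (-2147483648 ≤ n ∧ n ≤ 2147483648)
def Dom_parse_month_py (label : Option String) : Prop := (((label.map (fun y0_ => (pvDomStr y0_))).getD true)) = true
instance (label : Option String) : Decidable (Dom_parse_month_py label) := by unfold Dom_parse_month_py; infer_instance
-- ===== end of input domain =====

-- B replaces A's scan over the 12 (number, name) pairs by indexing the first three lowered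
-- characters into one packed abbreviation string and deriving the month from the aligned offset.

-- ===== PORT A =====
def pvMonths : List (Int × String) :=
  [(1,"January"),(2,"February"),(3,"March"),(4,"April"),(5,"May"),(6,"June"),
   (7,"July"),(8,"August"),(9,"September"),(10,"October"),(11,"November"),(12,"December")]

-- A's 'for num, name in MONTH_MAP.items(): if … return num' loop as structural recursion
def pvScanA (lab : String) : List (Int × String) → Option Int
  | [] => none
  | (num, name) :: rest =>
      if PySem.Str.lower lab == PySem.Str.lower name
         || PySem.Str.lower lab == PySem.Str.lower (PySem.Str.slice name none (some 3))
      then some num else pvScanA lab rest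

def parse_month_py (label : Option String) : Option Int :=
  match label with
  | none => none                       -- 'if not label' (None is falsy)
  | some s =>
    if s == "" then none               -- 'if not label' (empty string is falsy)
    else
      match pvScanA (PySem.Str.strip s) pvMonths with
      | some num => some num
      | none =>
        match PySem.Int.ofStr? (PySem.Str.strip s) with      -- int(label); none = ValueError
        | some num => if 1 <= num && num <= 12 then some num else none
        | none => none

-- ===== PORT B =====
def pvPacked : String := "janfebmaraprmayjunjulaugsepoctnovdec"
def pvFull : List String :=
  ["january","february","march","april","may","june","july",
   "august","september","october","november","december"]

-- i = _PACKED.find(u[:3]) as a function of t (= label.strip())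
def pvIdxB (t : String) : Int :=
  PySem.Str.find pvPacked (PySem.Str.slice (PySem.Str.lower t) none (some 3))

def parse_month_py_alt (label : Option String) : Option Int :=
  match label with
  | none => none                       -- 'if not label'
  | some s =>
    if s == "" then none               -- 'if not label'
    else
      -- if i >= 0 and i % 3 == 0 and (u == _PACKED[i:i+3] or u == _FULL[i//3]): return i//3+1
      if 0 ≤ pvIdxB (PySem.Str.strip s)
         && (PySem.Int.mod (pvIdxB (PySem.Str.strip s)) 3 == 0)
         && (PySem.Str.lower (PySem.Str.strip s)
               == PySem.Str.slice pvPacked (some (pvIdxB (PySem.Str.strip s)))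
                    (some (pvIdxB (PySem.Str.strip s) + 3))
             || PySem.List.pyGet? pvFull (PySem.Int.floordiv (pvIdxB (PySem.Str.strip s)) 3)
                  == some (PySem.Str.lower (PySem.Str.strip s)))
      then some (PySem.Int.floordiv (pvIdxB (PySem.Str.strip s)) 3 + 1)
      else
        match PySem.Int.ofStr? (PySem.Str.strip s) with      -- int(t); none = ValueError
        | some num => if 1 <= num && num <= 12 then some num else none
        | none => none

-- ===== PRECONDITION & SPEC =====
def Spec_parse_month_py (label : Option String) (out : Option Int) : Prop := out = parse_month_py_alt label
instance (label : Option String) (out : Option Int) : Decidable (Spec_parse_month_py label out) := by unfold Spec_parse_month_py; infer_instance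

-- ===== CLAIM (what is proved, stated in full; the proofs are below) =====
def Claim_equal_parse_month_py : Prop := ∀ (label : Option String), Dom_parse_month_py label → Spec_parse_month_py label (parse_month_py label)

-- ===== LEMMAS AND PROOFS =====

-- a value fetched by pyGet? is an element of the list
theorem pvGetMem {α : Type} (xs : List α) (i : Int) (v : α)
    (h : PySem.List.pyGet? xs i = some v) : v ∈ xs := by
  simp only [PySem.List.pyGet?, PySem.List.pyIdx?] at h
  split at h <;> split at h <;> simp only [Option.bind_some, Option.bind_none] at h <;>
    first
    | exact List.mem_of_getElem? h
    | simp at h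

-- if B's packed-string condition accepts u, then u is one of the 23 month strings
theorem pvCond_mem (u : String)
    (h1 : 0 ≤ PySem.Str.find pvPacked (PySem.Str.slice u none (some 3)))
    (h2 : PySem.Int.mod (PySem.Str.find pvPacked (PySem.Str.slice u none (some 3))) 3 = 0)
    (h3 : u = PySem.Str.slice pvPacked (some (PySem.Str.find pvPacked (PySem.Str.slice u none (some 3))))
                (some (PySem.Str.find pvPacked (PySem.Str.slice u none (some 3)) + 3))
        ∨ PySem.List.pyGet? pvFull
            (PySem.Int.floordiv (PySem.Str.find pvPacked (PySem.Str.slice u none (some 3))) 3)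
            = some u) :
    u ∈ ["january","jan","february","feb","march","mar","april","apr","may","june","jun",
         "july","jul","august","aug","september","sep","october","oct","november","nov",
         "december","dec"] := by
  rcases h3 with h | h
  swap
  · -- u was fetched from the full-name list
    have hu : u ∈ pvFull := pvGetMem _ _ _ h
    simp only [pvFull, List.mem_cons, List.not_mem_nil, or_false] at hu
    rcases hu with rfl|rfl|rfl|rfl|rfl|rfl|rfl|rfl|rfl|rfl|rfl|rfl <;> decide
  · -- u is an aligned three-character slice of the packed string
    have hle : PySem.Str.find pvPacked (PySem.Str.slice u none (some 3)) ≤ 36 := by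
      simpa [pvPacked] using
        PySem.Chars.find_le_length (pvPacked.toList) ((PySem.Str.slice u none (some 3)).toList)
    obtain ⟨n, hn⟩ := Int.eq_ofNat_of_zero_le h1
    rw [hn] at h2 h
    have hdvd : (3:ℕ) ∣ n := by
      exact_mod_cast PySem.Int.mod_eq_zero_iff_dvd (n:Int) 3 |>.mp (by exact_mod_cast h2)
    have hn36 : n ≤ 36 := by rw [hn] at hle; exact_mod_cast hle
    interval_cases n <;> try omega
    all_goals try (rw [h]; decide)
    -- n = 36: the slice is "", but find of the empty substring is 0, contradicting hn
    exact absurd (h ▸ hn) (by decide)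

set_option maxHeartbeats 2000000 in
theorem pvIfs (u : String) :
       (if u == "january" || u == "jan" then some (1:Int) else
       (if u == "february" || u == "feb" then some (2:Int) else
       (if u == "march" || u == "mar" then some (3:Int) else
       (if u == "april" || u == "apr" then some (4:Int) else
       (if u == "may" || u == "may" then some (5:Int) else
       (if u == "june" || u == "jun" then some (6:Int) else
       (if u == "july" || u == "jul" then some (7:Int) else
       (if u == "august" || u == "aug" then some (8:Int) else
       (if u == "september" || u == "sep" then some (9:Int) else
       (if u == "october" || u == "oct" then some (10:Int) else
       (if u == "november" || u == "nov" then some (11:Int) else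
       (if u == "december" || u == "dec" then some (12:Int) else
       none)))))))))))) =
      (if 0 ≤ PySem.Str.find pvPacked (PySem.Str.slice u none (some 3))
          && (PySem.Int.mod (PySem.Str.find pvPacked (PySem.Str.slice u none (some 3))) 3 == 0)
          && (u == PySem.Str.slice pvPacked
                     (some (PySem.Str.find pvPacked (PySem.Str.slice u none (some 3))))
                     (some (PySem.Str.find pvPacked (PySem.Str.slice u none (some 3)) + 3))
              || PySem.List.pyGet? pvFull
                   (PySem.Int.floordiv (PySem.Str.find pvPacked (PySem.Str.slice u none (some 3))) 3)
                   == some u)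
       then some (PySem.Int.floordiv (PySem.Str.find pvPacked (PySem.Str.slice u none (some 3))) 3 + 1)
       else none) := by
  by_cases h0 : u = "january"
  · subst h0; decide
  by_cases h1 : u = "jan"
  · subst h1; decide
  by_cases h2 : u = "february"
  · subst h2; decide
  by_cases h3 : u = "feb"
  · subst h3; decide
  by_cases h4 : u = "march"
  · subst h4; decide
  by_cases h5 : u = "mar"
  · subst h5; decide
  by_cases h6 : u = "april"
  · subst h6; decide
  by_cases h7 : u = "apr"
  · subst h7; decide
  by_cases h8 : u = "may"
  · subst h8; decide
  by_cases h9 : u = "june"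
  · subst h9; decide
  by_cases h10 : u = "jun"
  · subst h10; decide
  by_cases h11 : u = "july"
  · subst h11; decide
  by_cases h12 : u = "jul"
  · subst h12; decide
  by_cases h13 : u = "august"
  · subst h13; decide
  by_cases h14 : u = "aug"
  · subst h14; decide
  by_cases h15 : u = "september"
  · subst h15; decide
  by_cases h16 : u = "sep"
  · subst h16; decide
  by_cases h17 : u = "october"
  · subst h17; decide
  by_cases h18 : u = "oct"
  · subst h18; decide
  by_cases h19 : u = "november"
  · subst h19; decide
  by_cases h20 : u = "nov"
  · subst h20; decide
  by_cases h21 : u = "december"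
  · subst h21; decide
  by_cases h22 : u = "dec"
  · subst h22; decide
  have hC : (0 ≤ PySem.Str.find pvPacked (PySem.Str.slice u none (some 3))
         && (PySem.Int.mod (PySem.Str.find pvPacked (PySem.Str.slice u none (some 3))) 3 == 0)
         && (u == PySem.Str.slice pvPacked
                    (some (PySem.Str.find pvPacked (PySem.Str.slice u none (some 3))))
                    (some (PySem.Str.find pvPacked (PySem.Str.slice u none (some 3)) + 3))
             || PySem.List.pyGet? pvFull
                  (PySem.Int.floordiv (PySem.Str.find pvPacked (PySem.Str.slice u none (some 3))) 3)
                  == some u)) = false := by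
    rw [Bool.eq_false_iff]
    intro hb
    simp only [Bool.and_eq_true, decide_eq_true_eq, Bool.or_eq_true, beq_iff_eq] at hb
    obtain ⟨⟨hc1, hc2⟩, hc3⟩ := hb
    have hmem := pvCond_mem u hc1 hc2 hc3
    simp only [List.mem_cons, List.not_mem_nil, or_false, h0, h1, h2, h3, h4, h5, h6, h7, h8, h9, h10, h11, h12, h13, h14, h15, h16, h17, h18, h19, h20, h21, h22] at hmem
  simp only [
    show (u == "january") = false from beq_eq_false_iff_ne.mpr h0,
    show (u == "jan") = false from beq_eq_false_iff_ne.mpr h1,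
    show (u == "february") = false from beq_eq_false_iff_ne.mpr h2,
    show (u == "feb") = false from beq_eq_false_iff_ne.mpr h3,
    show (u == "march") = false from beq_eq_false_iff_ne.mpr h4,
    show (u == "mar") = false from beq_eq_false_iff_ne.mpr h5,
    show (u == "april") = false from beq_eq_false_iff_ne.mpr h6,
    show (u == "apr") = false from beq_eq_false_iff_ne.mpr h7,
    show (u == "may") = false from beq_eq_false_iff_ne.mpr h8,
    show (u == "june") = false from beq_eq_false_iff_ne.mpr h9,
    show (u == "jun") = false from beq_eq_false_iff_ne.mpr h10,
    show (u == "july") = false from beq_eq_false_iff_ne.mpr h11,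
    show (u == "jul") = false from beq_eq_false_iff_ne.mpr h12,
    show (u == "august") = false from beq_eq_false_iff_ne.mpr h13,
    show (u == "aug") = false from beq_eq_false_iff_ne.mpr h14,
    show (u == "september") = false from beq_eq_false_iff_ne.mpr h15,
    show (u == "sep") = false from beq_eq_false_iff_ne.mpr h16,
    show (u == "october") = false from beq_eq_false_iff_ne.mpr h17,
    show (u == "oct") = false from beq_eq_false_iff_ne.mpr h18,
    show (u == "november") = false from beq_eq_false_iff_ne.mpr h19,
    show (u == "nov") = false from beq_eq_false_iff_ne.mpr h20,
    show (u == "december") = false from beq_eq_false_iff_ne.mpr h21,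
    show (u == "dec") = false from beq_eq_false_iff_ne.mpr h22,
    Bool.or_self, if_false, Bool.false_eq_true, hC]

-- A's name scan agrees with B's packed-string indexing stage on every stripped label t
set_option maxHeartbeats 1000000 in
theorem pvScan_eq_idx (t : String) :
    pvScanA t pvMonths =
      (if 0 ≤ pvIdxB t
          && (PySem.Int.mod (pvIdxB t) 3 == 0)
          && (PySem.Str.lower t
                == PySem.Str.slice pvPacked (some (pvIdxB t)) (some (pvIdxB t + 3))
              || PySem.List.pyGet? pvFull (PySem.Int.floordiv (pvIdxB t) 3)
                   == some (PySem.Str.lower t))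
       then some (PySem.Int.floordiv (pvIdxB t) 3 + 1) else none) := by
  simp only [pvMonths, pvScanA, pvIdxB]
  simp only [
    show PySem.Str.lower "January" = "january" from by decide,
    show PySem.Str.lower (PySem.Str.slice "January" none (some 3)) = "jan" from by decide,
    show PySem.Str.lower "February" = "february" from by decide,
    show PySem.Str.lower (PySem.Str.slice "February" none (some 3)) = "feb" from by decide,
    show PySem.Str.lower "March" = "march" from by decide,
    show PySem.Str.lower (PySem.Str.slice "March" none (some 3)) = "mar" from by decide,
    show PySem.Str.lower "April" = "april" from by decide,
    show PySem.Str.lower (PySem.Str.slice "April" none (some 3)) = "apr" from by decide,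
    show PySem.Str.lower "May" = "may" from by decide,
    show PySem.Str.lower (PySem.Str.slice "May" none (some 3)) = "may" from by decide,
    show PySem.Str.lower "June" = "june" from by decide,
    show PySem.Str.lower (PySem.Str.slice "June" none (some 3)) = "jun" from by decide,
    show PySem.Str.lower "July" = "july" from by decide,
    show PySem.Str.lower (PySem.Str.slice "July" none (some 3)) = "jul" from by decide,
    show PySem.Str.lower "August" = "august" from by decide,
    show PySem.Str.lower (PySem.Str.slice "August" none (some 3)) = "aug" from by decide,
    show PySem.Str.lower "September" = "september" from by decide,
    show PySem.Str.lower (PySem.Str.slice "September" none (some 3)) = "sep" from by decide,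
    show PySem.Str.lower "October" = "october" from by decide,
    show PySem.Str.lower (PySem.Str.slice "October" none (some 3)) = "oct" from by decide,
    show PySem.Str.lower "November" = "november" from by decide,
    show PySem.Str.lower (PySem.Str.slice "November" none (some 3)) = "nov" from by decide,
    show PySem.Str.lower "December" = "december" from by decide,
    show PySem.Str.lower (PySem.Str.slice "December" none (some 3)) = "dec" from by decide]
  exact pvIfs (PySem.Str.lower t)

-- ===== VERDICT (by name: the statement is the Claim_ definition above) =====
theorem parse_month_py_spec : Claim_equal_parse_month_py := by
  intro label _
  unfold Spec_parse_month_py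
  cases label with
  | none => rfl
  | some s =>
    simp only [parse_month_py, parse_month_py_alt]
    rw [pvScan_eq_idx]
    split_ifs <;> rfl
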